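-- pv_equiv track=rewrite | github.com/cliffpham/algos_dataStructures | algos/greedy/all_products_except.py | product_to
-- ===== SOURCE A (Python) =====
-- def product_to(arr, n, i, val, cache):
--     if i in cache:
--         return cache[i]
--
--     if i == len(arr):
--         return val
--
--     result = product_to(arr, n, i+1, val * arr[i], cache)
--     cache[i] = result
--
--     return result
-- ===== SOURCE B (Python) =====
-- def product_to(arr, n, i, val, cache):
--     if i in cache:
--         return cache[i]
--     length = len(arr)
--     j, acc = i, val
--     while j not in cache and j != length:
--         acc *= arr[j]
--         j += 1
--     result = cache[j] if j in cache else acc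
--     for k in reversed(range(i, j)):
--         cache[k] = result
--     return result
-- ===== Notes on version B (the rewrite author's own statement) =====
-- stated objective: alternative
-- what changed: Replaces A's tail recursion (recurse to i+1, backfill cache on unwind) by an explicit iterative scan: walk j upward accumulating acc until the array end or a cached index, pick acc or the cached value, and backfill cache[i..j-1] in one pass.
import Mathlib
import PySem

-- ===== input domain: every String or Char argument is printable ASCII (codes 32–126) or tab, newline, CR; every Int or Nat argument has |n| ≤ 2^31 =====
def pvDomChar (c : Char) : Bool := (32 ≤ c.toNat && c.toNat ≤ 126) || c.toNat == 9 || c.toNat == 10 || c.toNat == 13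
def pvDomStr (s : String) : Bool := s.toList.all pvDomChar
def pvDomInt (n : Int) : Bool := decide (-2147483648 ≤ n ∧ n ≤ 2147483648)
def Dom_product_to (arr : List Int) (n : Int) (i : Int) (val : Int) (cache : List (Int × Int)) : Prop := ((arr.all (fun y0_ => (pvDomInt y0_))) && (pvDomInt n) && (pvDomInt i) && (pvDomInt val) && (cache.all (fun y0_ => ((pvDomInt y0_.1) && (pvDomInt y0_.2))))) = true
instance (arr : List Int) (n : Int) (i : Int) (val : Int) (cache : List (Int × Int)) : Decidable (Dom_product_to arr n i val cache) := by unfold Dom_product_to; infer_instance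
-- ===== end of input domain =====

-- B replaces A's tail recursion by an explicit upward scan with an accumulator plus one
-- backfill pass (objective: alternative decomposition). Both Pythons mutate `cache`
-- identically (same keys, same values, same insertion order); the theorems below are
-- about the RETURN value.

-- shared helper: Python's `i in cache` / `cache[i]` (dict lookup = first match)
def pvLookup (cache : List (Int × Int)) (k : Int) : Option Int :=
  (PySem.Dict.ofList cache).get? k

-- ===== PORT A =====
def product_to (arr : List Int) (n : Int) (i : Int) (val : Int) (cache : List (Int × Int)) : Int :=
  match pvLookup cache i with
  | some v => v                                  -- if i in cache: return cache[i]
  | none =>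
    if i = (arr.length : Int) then val           -- if i == len(arr): return val
    else
      match h : PySem.List.pyGet? arr i with
      | none => 0                                -- Python raises IndexError here (outside Pre_)
      | some a => product_to arr n (i + 1) (val * a) cache   -- result = product_to(..., i+1, val*arr[i], ...)
termination_by ((arr.length : Int) - i).toNat
decreasing_by
  have : ¬ PySem.List.pyGet? arr i = none := by simp [h]
  rw [PySem.List.pyGet?_eq_none_iff, PySem.Raise.InRange, not_not] at this
  omega

-- ===== PORT B =====
-- the while loop: walk j upward multiplying acc by arr[j] until j hits a cached index
-- or j == len(arr); returns the final (j, acc)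
def pvScan (arr : List Int) (cache : List (Int × Int)) (j : Int) (acc : Int) : Int × Int :=
  if (pvLookup cache j).isNone ∧ j ≠ (arr.length : Int) then
    match h : PySem.List.pyGet? arr j with
    | none => (j, acc)                           -- Python raises IndexError here (outside Pre_)
    | some a => pvScan arr cache (j + 1) (acc * a)
  else (j, acc)
termination_by ((arr.length : Int) - j).toNat
decreasing_by
  have : ¬ PySem.List.pyGet? arr j = none := by simp [h]
  rw [PySem.List.pyGet?_eq_none_iff, PySem.Raise.InRange, not_not] at this
  omega

def product_to_alt (arr : List Int) (n : Int) (i : Int) (val : Int) (cache : List (Int × Int)) : Int :=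
  match pvLookup cache i with
  | some v => v                                  -- if i in cache: return cache[i]
  | none =>
    let p := pvScan arr cache i val              -- the while loop
    match pvLookup cache p.1 with                -- result = cache[j] if j in cache else acc
    | some v => v
    | none => p.2
    -- (the backfill `for k in reversed(range(i, j)): cache[k] = result` only mutates
    -- the caller's dict; it does not affect the return value, ports compare returns)

-- ===== PRECONDITION & SPEC =====
-- Pre_ excludes exactly the inputs on which Python A raises IndexError: i not a key of
-- cache and i outside [-len(arr), len(arr)] (A then reaches arr[i] out of range).
def Pre_product_to (arr : List Int) (n : Int) (i : Int) (val : Int) (cache : List (Int × Int)) : Prop :=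
  (pvLookup cache i).isSome ∨ (-(arr.length : Int) ≤ i ∧ i ≤ (arr.length : Int))
instance (arr : List Int) (n : Int) (i : Int) (val : Int) (cache : List (Int × Int)) : Decidable (Pre_product_to arr n i val cache) := by unfold Pre_product_to; infer_instance

def pvWitness_product_to : List Int × Int × Int × Int × (List (Int × Int)) := ([2, 3, 4], 3, 0, 1, [(2, 10)])

def Spec_product_to (arr : List Int) (n : Int) (i : Int) (val : Int) (cache : List (Int × Int)) (out : Int) : Prop := out = product_to_alt arr n i val cache
instance (arr : List Int) (n : Int) (i : Int) (val : Int) (cache : List (Int × Int)) (out : Int) : Decidable (Spec_product_to arr n i val cache out) := by unfold Spec_product_to; infer_instance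

-- ===== CLAIM (what is proved, stated in full; the proofs are below) =====
def Claim_equal_product_to : Prop := ∀ (arr : List Int) (n : Int) (i : Int) (val : Int) (cache : List (Int × Int)), Dom_product_to arr n i val cache → Pre_product_to arr n i val cache → Spec_product_to arr n i val cache (product_to arr n i val cache)

-- ===== LEMMAS AND PROOFS =====

-- one step of B: on a cache miss at i with i in range, B at (i, val) equals B at (i+1, val*a)
theorem alt_step (arr : List Int) (n i val : Int) (cache : List (Int × Int))
    (hc : pvLookup cache i = none) (hne : i ≠ (arr.length : Int))
    (a : Int) (ha : PySem.List.pyGet? arr i = some a) :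
    product_to_alt arr n i val cache = product_to_alt arr n (i + 1) (val * a) cache := by
  unfold product_to_alt
  rw [hc]
  have hscan : pvScan arr cache i val = pvScan arr cache (i + 1) (val * a) := by
    rw [pvScan]
    simp only [hc, hne, Option.isNone_none, ne_eq, not_false_iff, and_true, if_true]
    split
    · next h => rw [ha] at h; exact absurd h (by simp)
    · next a' h => rw [ha] at h; injection h with h'; rw [h']
  rw [hscan]
  cases hc' : pvLookup cache (i + 1) with
  | some v =>
    have : pvScan arr cache (i + 1) (val * a) = (i + 1, val * a) := by
      rw [pvScan]; simp [hc']
    simp [this, hc']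
  | none => simp

theorem main_eq (arr : List Int) (n : Int) (cache : List (Int × Int)) :
    ∀ (k : Nat) (i val : Int), ((arr.length : Int) - i).toNat ≤ k →
      Pre_product_to arr n i val cache →
      product_to arr n i val cache = product_to_alt arr n i val cache := by
  intro k
  induction k with
  | zero =>
    intro i val hk hpre
    cases hc : pvLookup cache i with
    | some v =>
      rw [product_to, product_to_alt]; simp [hc]
    | none =>
      have hi : i = (arr.length : Int) := by
        rcases hpre with h | h
        · simp [hc] at h
        · omega
      subst hi
      rw [product_to, product_to_alt]
      have hscan : pvScan arr cache ((arr.length : Int)) val = ((arr.length : Int), val) := by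
        rw [pvScan]; simp
      simp [hc, hscan]
  | succ k ih =>
    intro i val hk hpre
    cases hc : pvLookup cache i with
    | some v =>
      rw [product_to, product_to_alt]; simp [hc]
    | none =>
      by_cases hi : i = (arr.length : Int)
      · subst hi
        rw [product_to, product_to_alt]
        have hscan : pvScan arr cache ((arr.length : Int)) val = ((arr.length : Int), val) := by
          rw [pvScan]; simp
        simp [hc, hscan]
      · have hrange : -(arr.length : Int) ≤ i ∧ i ≤ (arr.length : Int) := by
          rcases hpre with h | h
          · simp [hc] at h
          · exact h
        have hlt : i < (arr.length : Int) := lt_of_le_of_ne hrange.2 hi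
        have ha : ∃ a, PySem.List.pyGet? arr i = some a := by
          cases hg : PySem.List.pyGet? arr i with
          | none =>
            rw [PySem.List.pyGet?_eq_none_iff, PySem.Raise.InRange] at hg
            omega
          | some a => exact ⟨a, rfl⟩
        obtain ⟨a, ha⟩ := ha
        have hA : product_to arr n i val cache = product_to arr n (i + 1) (val * a) cache := by
          rw [product_to]
          simp only [hc, hi, if_false]
          split
          · next h => rw [ha] at h; exact absurd h (by simp)
          · next a' h => rw [ha] at h; injection h with h'; rw [h']
        rw [hA, alt_step arr n i val cache hc hi a ha]
        exact ih (i + 1) (val * a) (by omega)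
          (Or.inr ⟨by omega, by omega⟩)

-- ===== VERDICT (by name: the statement is the Claim_ definition above) =====
theorem product_to_spec : Claim_equal_product_to := by
  intro arr n i val cache _ hpre
  unfold Spec_product_to
  exact main_eq arr n cache ((arr.length : Int) - i).toNat i val le_rfl hpre
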